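-- pv_equiv track=rewrite | github.com/AlexxNica/bfg9000 | bfg9000/iterutils.py | tween
-- ===== SOURCE A (Python) =====
-- def tween(iterable, delim, prefix=None, suffix=None):
--     first = True
--     for i in iterable:
--         if first:
--             first = False
--             if prefix is not None:
--                 yield prefix
--         else:
--             yield delim
--         yield i
--     if not first and suffix is not None:
--         yield suffix
-- ===== SOURCE B (Python) =====
-- def tween(iterable, delim, prefix=None, suffix=None):
--     items = list(iterable)
--     if not items:
--         return
--     out = [delim] * (2 * len(items) - 1)
--     out[0::2] = items
--     if prefix is not None:
--         out.insert(0, prefix)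
--     if suffix is not None:
--         out.append(suffix)
--     yield from out
-- ===== Notes on version B (the rewrite author's own statement) =====
-- stated objective: alternative
-- what changed: B materializes the input and builds the result in closed form: it allocates a [delim]*(2n-1) list, slice-assigns the items into the even slots (no per-element loop or first-iteration flag), then prepends/appends the optional prefix/suffix; A threads a boolean flag through a single generator loop.
import Mathlib
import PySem

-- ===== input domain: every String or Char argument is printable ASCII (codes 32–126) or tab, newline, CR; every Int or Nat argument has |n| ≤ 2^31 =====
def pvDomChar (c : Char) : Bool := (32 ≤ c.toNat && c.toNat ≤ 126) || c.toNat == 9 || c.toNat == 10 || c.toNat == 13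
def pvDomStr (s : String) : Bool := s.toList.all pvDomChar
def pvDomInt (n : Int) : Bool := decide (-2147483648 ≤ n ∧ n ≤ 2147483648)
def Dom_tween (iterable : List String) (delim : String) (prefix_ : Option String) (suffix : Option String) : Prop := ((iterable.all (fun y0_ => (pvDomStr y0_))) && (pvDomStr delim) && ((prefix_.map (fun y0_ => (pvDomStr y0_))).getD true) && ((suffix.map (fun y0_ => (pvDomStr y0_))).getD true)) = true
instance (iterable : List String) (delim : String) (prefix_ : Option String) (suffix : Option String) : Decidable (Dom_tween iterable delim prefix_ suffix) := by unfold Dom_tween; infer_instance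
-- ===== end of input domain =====

-- B builds the output in closed form (a delim-filled list with the items slice-assigned into
-- the even slots) instead of A's flag-driven generator loop; B consumes the iterable eagerly
-- (the equivalence is about the sequence of yielded values). Both ports return that sequence.

-- ===== PORT A =====
-- A: loop with a 'first' flag; state = (first, yields so far), then the suffix check.
def tweenStep (delim : String) (prefix_ : Option String) (s : Bool × List String) (i : String) : Bool × List String :=
  if s.1 then
    (false, (match prefix_ with | some p => s.2 ++ [p] | none => s.2) ++ [i])
  else
    (false, s.2 ++ [delim] ++ [i])

def tween (iterable : List String) (delim : String) (prefix_ : Option String) (suffix : Option String) : List String :=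
  let st := iterable.foldl (tweenStep delim prefix_) (true, [])
  if st.1 = false then
    match suffix with
    | some suf => st.2 ++ [suf]
    | none => st.2
  else st.2

-- ===== PORT B =====
-- Hand port of Python's extended-slice assignment `out[0::2] = vals` (exact here: the caller
-- always supplies exactly as many vals as there are even slots in base).
def sliceAssignEvery2 : List String → List String → List String
  | base, [] => base
  | [], _ :: _ => []
  | _ :: rest, v :: vs =>
    match rest with
    | [] => [v]
    | d :: rest' => v :: d :: sliceAssignEvery2 rest' vs

-- B: allocate [delim]*(2n-1), slice-assign items into even slots, then prefix/suffix.
def tween_alt (iterable : List String) (delim : String) (prefix_ : Option String) (suffix : Option String) : List String :=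
  if iterable = [] then []
  else
    let out := sliceAssignEvery2 (List.replicate (2 * iterable.length - 1) delim) iterable
    let out := match prefix_ with | some p => p :: out | none => out   -- out.insert(0, prefix)
    match suffix with | some s => out ++ [s] | none => out             -- out.append(suffix)

-- ===== PRECONDITION & SPEC =====
def Spec_tween (iterable : List String) (delim : String) (prefix_ : Option String) (suffix : Option String) (out : List String) : Prop := out = tween_alt iterable delim prefix_ suffix
instance (iterable : List String) (delim : String) (prefix_ : Option String) (suffix : Option String) (out : List String) : Decidable (Spec_tween iterable delim prefix_ suffix out) := by unfold Spec_tween; infer_instance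

-- ===== CLAIM (what is proved, stated in full; the proofs are below) =====
def Claim_equal_tween : Prop := ∀ (iterable : List String) (delim : String) (prefix_ : Option String) (suffix : Option String), Dom_tween iterable delim prefix_ suffix → Spec_tween iterable delim prefix_ suffix (tween iterable delim prefix_ suffix)

-- ===== LEMMAS AND PROOFS =====

-- Once the flag is false, A's fold just appends delim/item pairs.
theorem tween_foldl_false (rest : List String) (delim : String) (prefix_ : Option String) (acc : List String) :
    rest.foldl (tweenStep delim prefix_) (false, acc)
    = (false, acc ++ rest.flatMap (fun i => [delim, i])) := by
  induction rest generalizing acc with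
  | nil => simp
  | cons x xs ih =>
    rw [List.foldl_cons, show tweenStep delim prefix_ (false, acc) x
        = (false, acc ++ [delim] ++ [x]) from by simp [tweenStep], ih]
    simp

-- B's closed-form construction produces the interleaved sequence.
theorem sliceAssign_replicate (delim : String) (xs : List String) (x : String) :
    sliceAssignEvery2 (List.replicate (2 * xs.length + 1) delim) (x :: xs)
    = x :: xs.flatMap (fun i => [delim, i]) := by
  induction xs generalizing x with
  | nil => simp [sliceAssignEvery2]
  | cons y ys ih =>
    have h : 2 * (y :: ys).length + 1 = (2 * ys.length + 1) + 1 + 1 := by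
      simp [List.length_cons]; ring
    rw [h, List.replicate_succ, List.replicate_succ]
    simp [sliceAssignEvery2, ih y]

-- ===== VERDICT (by name: the statement is the Claim_ definition above) =====
theorem tween_spec : Claim_equal_tween := by
  intro iterable delim prefix_ suffix _
  unfold Spec_tween tween tween_alt
  cases iterable with
  | nil => simp
  | cons x xs =>
    rw [List.foldl_cons, show tweenStep delim prefix_ (true, []) x
        = (false, (match prefix_ with | some p => [p] | none => []) ++ [x]) from by
          cases prefix_ <;> simp [tweenStep],
        tween_foldl_false xs delim prefix_ _]
    have hlen : 2 * (x :: xs).length - 1 = 2 * xs.length + 1 := by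
      simp [List.length_cons]; omega
    rw [if_neg (by simp : ¬ (x :: xs = [])), hlen, sliceAssign_replicate]
    cases prefix_ <;> cases suffix <;> simp
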